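-- pv_equiv track=rewrite | github.com/nimeresam/code_training | dynamic programming/coin_change.py | count_original
-- ===== SOURCE A (Python) =====
-- def count_original(cl, cc, amount):
--     '''
--     Arguments:
--         cl {number[]} -- coins list
--         cc {number} -- coins count
--         amount {number} -- amount to be changed
--     '''
--
--     if amount == 0:
--         return 1
--
--     if amount < 0:
--         return 0
--
--     if cc <= 0:
--         return 0
--
--     return count_original(cl, cc-1, amount) + count_original(cl, cc, amount - cl[cc-1])
-- ===== SOURCE B (Python) =====
-- def count_original(cl, cc, amount):
--     memo = {}
--
--     def ways(cc, amount):
--         if amount == 0: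
--             return 1
--         if amount < 0:
--             return 0
--         if cc <= 0:
--             return 0
--         key = (cc, amount)
--         if key not in memo:
--             memo[key] = ways(cc - 1, amount) + ways(cc, amount - cl[cc - 1])
--         return memo[key]
--
--     return ways(cc, amount)
-- ===== Notes on version B (the rewrite author's own statement) =====
-- stated objective: alternative
-- what changed: Replaced A's naive exponential double recursion by top-down dynamic programming: the same recurrence evaluated once per (cc, amount) state through a memo dictionary.
import Mathlib
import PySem

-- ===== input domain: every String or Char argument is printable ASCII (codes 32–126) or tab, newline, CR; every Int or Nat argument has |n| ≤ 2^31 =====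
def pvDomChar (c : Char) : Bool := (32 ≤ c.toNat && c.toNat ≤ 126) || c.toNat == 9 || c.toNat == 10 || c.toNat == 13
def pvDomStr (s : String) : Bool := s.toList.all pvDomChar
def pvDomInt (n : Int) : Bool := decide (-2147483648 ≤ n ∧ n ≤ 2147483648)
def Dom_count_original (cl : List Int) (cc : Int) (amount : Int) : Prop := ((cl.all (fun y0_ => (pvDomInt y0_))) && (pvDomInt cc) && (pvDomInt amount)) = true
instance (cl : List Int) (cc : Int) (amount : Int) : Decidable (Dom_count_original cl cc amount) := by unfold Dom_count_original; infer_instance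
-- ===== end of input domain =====

-- B evaluates A's recurrence with memoization (top-down DP), one evaluation per (cc, amount) state.

-- ===== PORT A =====
-- The fuel wrapper only makes A's recursion total in Lean; on Pre_ inputs the fuel is proven sufficient.
def countFuel : Nat → List Int → Int → Int → Int
  | 0, _, _, _ => 0
  | fuel+1, cl, cc, amount =>
    if amount = 0 then 1
    else if amount < 0 then 0
    else if cc ≤ 0 then 0
    else countFuel fuel cl (cc-1) amount +
         countFuel fuel cl cc (amount - ((PySem.List.pyGet? cl (cc-1)).getD 0))

def count_original (cl : List Int) (cc : Int) (amount : Int) : Int :=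
  countFuel (cc.toNat + amount.toNat + 1) cl cc amount

-- ===== PORT B =====
-- top-down recursion with a memo dict threaded through (Python's closure-captured `memo`)
def waysMemo (cl : List Int) : Nat → PySem.Dict (Int × Int) Int → Int → Int → Int × PySem.Dict (Int × Int) Int
  | 0, memo, _, _ => (0, memo)
  | fuel+1, memo, cc, amount =>
    if amount = 0 then (1, memo)
    else if amount < 0 then (0, memo)
    else if cc ≤ 0 then (0, memo)
    else
      match memo.get? (cc, amount) with
      | some v => (v, memo)
      | none =>
        let r1 := waysMemo cl fuel memo (cc-1) amount
        let r2 := waysMemo cl fuel r1.2 cc (amount - ((PySem.List.pyGet? cl (cc-1)).getD 0))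
        let v := r1.1 + r2.1
        (v, r2.2.insert (cc, amount) v)

def count_original_alt (cl : List Int) (cc : Int) (amount : Int) : Int :=
  (waysMemo cl (cc.toNat + amount.toNat + 1) PySem.Dict.empty cc amount).1

-- ===== PRECONDITION & SPEC =====
-- Pre_ excludes exactly the inputs on which A does not return: amount>0 with cc>len(cl)
-- (IndexError at cl[cc-1]) or with a nonpositive coin among the first cc (infinite recursion,
-- Python RecursionError).
def Pre_count_original (cl : List Int) (cc : Int) (amount : Int) : Prop :=
  amount ≤ 0 ∨ cc ≤ 0 ∨ (cc ≤ (cl.length : Int) ∧ ∀ c ∈ cl.take cc.toNat, 0 < c)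
instance (cl : List Int) (cc : Int) (amount : Int) : Decidable (Pre_count_original cl cc amount) := by
  unfold Pre_count_original; infer_instance

def pvWitness_count_original : List Int × Int × Int := ([1, 2, 5], 3, 7)

def Spec_count_original (cl : List Int) (cc : Int) (amount : Int) (out : Int) : Prop :=
  out = count_original_alt cl cc amount
instance (cl : List Int) (cc : Int) (amount : Int) (out : Int) : Decidable (Spec_count_original cl cc amount out) := by
  unfold Spec_count_original; infer_instance

-- ===== CLAIM (what is proved, stated in full; the proofs are below) =====
def Claim_equal_count_original : Prop := ∀ (cl : List Int) (cc : Int) (amount : Int), Dom_count_original cl cc amount → Pre_count_original cl cc amount → Spec_count_original cl cc amount (count_original cl cc amount)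

-- ===== LEMMAS AND PROOFS =====

lemma pos_take_mono (cl : List Int) (m n : Nat) (h : m ≤ n)
    (hp : ∀ c ∈ cl.take n, 0 < c) : ∀ c ∈ cl.take m, 0 < c := by
  intro c hc
  apply hp
  have he : cl.take m = (cl.take n).take m := by rw [List.take_take, Nat.min_eq_left h]
  rw [he] at hc
  exact List.take_subset _ _ hc

lemma getElem_mem_take (cl : List Int) (k : Nat) (h : k < cl.length) :
    cl[k] ∈ cl.take (k + 1) := by
  have hl : k < (cl.take (k+1)).length := by simp [List.length_take]; omega
  have he : (cl.take (k+1))[k] = cl[k] := List.getElem_take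
  rw [← he]
  exact List.getElem_mem hl

lemma countFuel_succ (f : Nat) (cl : List Int) (cc amount : Int) :
    countFuel (f+1) cl cc amount =
      (if amount = 0 then 1
       else if amount < 0 then 0
       else if cc ≤ 0 then 0
       else countFuel f cl (cc-1) amount +
            countFuel f cl cc (amount - ((PySem.List.pyGet? cl (cc-1)).getD 0))) := rfl

-- the fuel is irrelevant once it exceeds cc.toNat + amount.toNat, under Pre_'s conditions
lemma countFuel_irrel (cl : List Int) : ∀ (fuel fuel' : Nat) (cc amount : Int),
    cc.toNat + amount.toNat < fuel → cc.toNat + amount.toNat < fuel' →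
    cc ≤ (cl.length : Int) → (∀ c ∈ cl.take cc.toNat, 0 < c) →
    countFuel fuel cl cc amount = countFuel fuel' cl cc amount := by
  intro fuel
  induction fuel with
  | zero => intro fuel' cc amount h; omega
  | succ f ih =>
    intro fuel' cc amount h h' hlen hpos
    cases fuel' with
    | zero => omega
    | succ f' =>
      rw [countFuel_succ f, countFuel_succ f']
      by_cases h0 : amount = 0
      · simp [h0]
      · by_cases hneg : amount < 0
        · simp [h0, hneg]
        · by_cases hcc : cc ≤ 0
          · simp [h0, hneg, hcc]
          · rw [if_neg h0, if_neg hneg, if_neg hcc, if_neg h0, if_neg hneg, if_neg hcc]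
            push_neg at hcc hneg
            have hidx : (cc-1).toNat < cl.length := by omega
            have hget : PySem.List.pyGet? cl (cc-1) = some cl[(cc-1).toNat] :=
              PySem.List.pyGet?_eq_some_getElem cl (by omega) (by omega)
            rw [hget]
            simp only [Option.getD_some]
            have hmem : cl[(cc-1).toNat] ∈ cl.take cc.toNat := by
              have he : (cc-1).toNat + 1 = cc.toNat := by omega
              have := getElem_mem_take cl (cc-1).toNat hidx
              rwa [he] at this
            have hcoin : 0 < cl[(cc-1).toNat] := hpos _ hmem
            have hpos' : ∀ c ∈ cl.take (cc-1).toNat, 0 < c :=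
              pos_take_mono cl _ _ (by omega) hpos
            rw [ih f' (cc-1) amount (by omega) (by omega) (by omega) hpos',
                ih f' cc (amount - cl[(cc-1).toNat]) (by omega) (by omega) hlen hpos]

def GoodMemo (cl : List Int) (m : PySem.Dict (Int × Int) Int) : Prop :=
  ∀ c a v, m.get? (c, a) = some v →
    0 < c ∧ 0 < a ∧ c ≤ (cl.length : Int) ∧ (∀ x ∈ cl.take c.toNat, 0 < x) ∧
    v = countFuel (c.toNat + a.toNat + 1) cl c a

lemma waysMemo_succ (cl : List Int) (f : Nat) (memo : PySem.Dict (Int × Int) Int)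
    (cc amount : Int) :
    waysMemo cl (f+1) memo cc amount =
      (if amount = 0 then ((1:Int), memo)
       else if amount < 0 then (0, memo)
       else if cc ≤ 0 then (0, memo)
       else
         match memo.get? (cc, amount) with
         | some v => (v, memo)
         | none =>
           let r1 := waysMemo cl f memo (cc-1) amount
           let r2 := waysMemo cl f r1.2 cc (amount - ((PySem.List.pyGet? cl (cc-1)).getD 0))
           let v := r1.1 + r2.1
           (v, r2.2.insert (cc, amount) v)) := rfl

lemma goodMemo_empty (cl : List Int) : GoodMemo cl PySem.Dict.empty := by
  intro c a v hv
  rw [PySem.Dict.get?_empty] at hv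
  exact absurd hv (by simp)

lemma waysMemo_spec (cl : List Int) : ∀ (fuel : Nat) (memo : PySem.Dict (Int × Int) Int)
    (cc amount : Int),
    cc.toNat + amount.toNat < fuel → cc ≤ (cl.length : Int) →
    (∀ x ∈ cl.take cc.toNat, 0 < x) → GoodMemo cl memo →
    (waysMemo cl fuel memo cc amount).1 = countFuel fuel cl cc amount ∧
    GoodMemo cl (waysMemo cl fuel memo cc amount).2 := by
  intro fuel
  induction fuel with
  | zero => intro memo cc amount h; omega
  | succ f ih =>
    intro memo cc amount h hlen hpos hgood
    rw [waysMemo_succ, countFuel_succ]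
    by_cases h0 : amount = 0
    · rw [if_pos h0, if_pos h0]
      exact ⟨rfl, hgood⟩
    · rw [if_neg h0, if_neg h0]
      by_cases hneg : amount < 0
      · rw [if_pos hneg, if_pos hneg]
        exact ⟨rfl, hgood⟩
      · rw [if_neg hneg, if_neg hneg]
        by_cases hcc : cc ≤ 0
        · rw [if_pos hcc, if_pos hcc]
          exact ⟨rfl, hgood⟩
        · rw [if_neg hcc, if_neg hcc]
          push_neg at hcc hneg
          have hidx : (cc-1).toNat < cl.length := by omega
          have hget : PySem.List.pyGet? cl (cc-1) = some cl[(cc-1).toNat] :=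
            PySem.List.pyGet?_eq_some_getElem cl (by omega) (by omega)
          have hmem : cl[(cc-1).toNat] ∈ cl.take cc.toNat := by
            have he : (cc-1).toNat + 1 = cc.toNat := by omega
            have := getElem_mem_take cl (cc-1).toNat hidx
            rwa [he] at this
          have hcoin : 0 < cl[(cc-1).toNat] := hpos _ hmem
          have hpos' : ∀ x ∈ cl.take (cc-1).toNat, 0 < x :=
            pos_take_mono cl _ _ (by omega) hpos
          cases hq : memo.get? (cc, amount) with
          | some v =>
            obtain ⟨_, _, _, _, hv⟩ := hgood cc amount v hq
            refine ⟨?_, hgood⟩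
            show v = countFuel f cl (cc-1) amount +
                countFuel f cl cc (amount - ((PySem.List.pyGet? cl (cc-1)).getD 0))
            have hv2 : v = countFuel (f+1) cl cc amount :=
              hv.trans (countFuel_irrel cl (cc.toNat + amount.toNat + 1) (f+1) cc amount
                (by omega) (by omega) hlen hpos)
            rw [hv2, countFuel_succ, if_neg h0, if_neg (by omega), if_neg (by omega)]
          | none =>
            obtain ⟨h1v, h1g⟩ := ih memo (cc-1) amount (by omega) (by omega) hpos' hgood
            obtain ⟨h2v, h2g⟩ := ih (waysMemo cl f memo (cc-1) amount).2 cc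
              (amount - ((PySem.List.pyGet? cl (cc-1)).getD 0))
              (by rw [hget]; simp only [Option.getD_some]; omega) hlen hpos h1g
            constructor
            · show (waysMemo cl f memo (cc-1) amount).1 +
                  (waysMemo cl f (waysMemo cl f memo (cc-1) amount).2 cc
                    (amount - ((PySem.List.pyGet? cl (cc-1)).getD 0))).1
                = countFuel f cl (cc-1) amount +
                  countFuel f cl cc (amount - ((PySem.List.pyGet? cl (cc-1)).getD 0))
              rw [h1v, h2v]
            · show GoodMemo cl
                ((waysMemo cl f (waysMemo cl f memo (cc-1) amount).2 cc
                   (amount - ((PySem.List.pyGet? cl (cc-1)).getD 0))).2.insert (cc, amount)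
                   ((waysMemo cl f memo (cc-1) amount).1 +
                    (waysMemo cl f (waysMemo cl f memo (cc-1) amount).2 cc
                      (amount - ((PySem.List.pyGet? cl (cc-1)).getD 0))).1))
              intro c a w hw
              rw [PySem.Dict.get?_insert] at hw
              by_cases hk : (c, a) = (cc, amount)
              · rw [if_pos hk] at hw
                have hc1 : c = cc := congrArg Prod.fst hk
                have ha1 : a = amount := congrArg Prod.snd hk
                subst hc1; subst ha1
                refine ⟨by omega, by omega, hlen, hpos, ?_⟩
                have hwv : w = (waysMemo cl f memo (c-1) a).1 +
                    (waysMemo cl f (waysMemo cl f memo (c-1) a).2 c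
                      (a - ((PySem.List.pyGet? cl (c-1)).getD 0))).1 :=
                  (Option.some.inj hw).symm
                have hwc : w = countFuel (f+1) cl c a := by
                  rw [hwv, h1v, h2v, countFuel_succ, if_neg h0, if_neg (by omega),
                      if_neg (by omega)]
                rw [hwc]
                exact countFuel_irrel cl (f+1) (c.toNat + a.toNat + 1) c a
                  (by omega) (by omega) hlen hpos
              · rw [if_neg hk] at hw
                exact h2g c a w hw

-- ===== VERDICT (by name: the statement is the Claim_ definition above) =====
theorem count_original_spec : Claim_equal_count_original := by
  intro cl cc amount _ hpre
  unfold Spec_count_original count_original count_original_alt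
  by_cases h0 : amount = 0
  · subst h0
    rw [countFuel_succ, waysMemo_succ]
    simp
  · by_cases hneg : amount < 0
    · rw [countFuel_succ, waysMemo_succ]
      rw [if_neg h0, if_neg h0, if_pos hneg, if_pos hneg]
    · by_cases hcc : cc ≤ 0
      · rw [countFuel_succ, waysMemo_succ]
        rw [if_neg h0, if_neg h0, if_neg hneg, if_neg hneg, if_pos hcc, if_pos hcc]
      · rcases hpre with h | h | ⟨hlen, hp⟩
        · omega
        · omega
        · exact (waysMemo_spec cl (cc.toNat + amount.toNat + 1) PySem.Dict.empty cc amount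
            (by omega) hlen hp (goodMemo_empty cl)).1.symm
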